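-- pv_equiv track=rewrite | github.com/KeFungi/SUIMAT_pub | align_sam.py | get_oldgap_pos
-- ===== SOURCE A (Python) =====
-- def get_oldgap_pos(seq):
--     """get gap positions in a sequence progressively"""
--     pos=0
--     gap_list = []
--     for i in range(len(seq)):
--         if seq[i] != '-':
--             pos = pos + 1
--         elif seq[i] == '-':
--             gap_list = gap_list + [pos+1]
--     return gap_list
-- ===== SOURCE B (Python) =====
-- def get_oldgap_pos(seq):
--     """get gap positions in a sequence progressively"""
--     counts = []
--     total = 0
--     for c in seq:
--         total += c != '-'
--         counts.append(total)
--     return [t + 1 for t, c in zip(counts, seq) if c == '-']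
-- ===== Notes on version B (the rewrite author's own statement) =====
-- stated objective: alternative
-- what changed: Replaces A's single interleaved scan (conditional counter vs conditional append) by a prefix table of cumulative non-gap counts built first, then a separate filtering comprehension over zip(counts, seq) that selects the gap positions.
import Mathlib
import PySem

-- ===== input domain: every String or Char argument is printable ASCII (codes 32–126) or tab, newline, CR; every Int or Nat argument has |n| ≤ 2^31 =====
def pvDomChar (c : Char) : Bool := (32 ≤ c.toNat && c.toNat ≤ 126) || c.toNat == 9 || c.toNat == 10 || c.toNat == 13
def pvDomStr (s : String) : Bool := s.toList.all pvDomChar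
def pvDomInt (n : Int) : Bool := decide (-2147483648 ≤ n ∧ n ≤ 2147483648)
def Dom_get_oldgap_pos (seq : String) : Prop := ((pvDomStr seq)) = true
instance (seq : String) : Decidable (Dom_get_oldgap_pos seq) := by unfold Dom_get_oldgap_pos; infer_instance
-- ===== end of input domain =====

-- ===== PORT A =====
-- B replaces A's interleaved counter/append scan by a prefix table of cumulative
-- non-gap counts plus a separate filtering pass (alternative decomposition).

-- A's loop: for each char in order, bump pos on non-gap, else append pos+1.
def pvLoopA : List Char → Int → List Int → List Int
  | [], _, gapList => gapList
  | c :: cs, pos, gapList =>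
    if c ≠ '-' then pvLoopA cs (pos + 1) gapList
    else pvLoopA cs pos (gapList ++ [pos + 1])

def get_oldgap_pos (seq : String) : List Int :=
  pvLoopA seq.toList 0 []

-- ===== PORT B =====
-- counts: running totals of (c != '-') over the sequence (B's first loop).
def pvCounts : List Char → Int → List Int
  | [], _ => []
  | c :: cs, total =>
    let total' := total + (if c ≠ '-' then 1 else 0)
    total' :: pvCounts cs total'

def get_oldgap_pos_alt (seq : String) : List Int :=
  ((pvCounts seq.toList 0).zip seq.toList).filterMap
    (fun tc => if tc.2 = '-' then some (tc.1 + 1) else none)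

-- ===== PRECONDITION & SPEC =====
def Spec_get_oldgap_pos (seq : String) (out : List Int) : Prop := out = get_oldgap_pos_alt seq
instance (seq : String) (out : List Int) : Decidable (Spec_get_oldgap_pos seq out) := by unfold Spec_get_oldgap_pos; infer_instance

-- ===== CLAIM (what is proved, stated in full; the proofs are below) =====
def Claim_equal_get_oldgap_pos : Prop := ∀ (seq : String), Dom_get_oldgap_pos seq → Spec_get_oldgap_pos seq (get_oldgap_pos seq)

-- ===== LEMMAS AND PROOFS =====
theorem pvLoopA_eq (cs : List Char) : ∀ (pos : Int) (gapList : List Int),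
    pvLoopA cs pos gapList =
      gapList ++ ((pvCounts cs pos).zip cs).filterMap
        (fun tc => if tc.2 = '-' then some (tc.1 + 1) else none) := by
  induction cs with
  | nil => intro pos gapList; simp [pvLoopA, pvCounts]
  | cons c cs ih =>
    intro pos gapList
    by_cases h : c = '-'
    · subst h
      simp [pvLoopA, pvCounts, ih pos (gapList ++ [pos + 1]), List.zip]
    · simp [pvLoopA, pvCounts, h, ih (pos + 1) gapList, List.zip]

-- ===== VERDICT (by name: the statement is the Claim_ definition above) =====
theorem get_oldgap_pos_spec : Claim_equal_get_oldgap_pos := by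
  intro seq _
  unfold Spec_get_oldgap_pos get_oldgap_pos get_oldgap_pos_alt
  simp [pvLoopA_eq]
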